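-- pv_equiv track=rewrite | github.com/emailme1042/home-assistant-ops-core | custom_components/feelfit/sensor.py | _map_date_format
-- ===== SOURCE A (Python) =====
-- def _map_date_format(fmt: str) -> str:
--     if not fmt:
--         return "%Y-%m-%d"
--     mapping = {"dd": "%d", "MM": "%m", "yyyy": "%Y", "yy": "%y"}
--     out = fmt
--     for k, v in mapping.items():
--         out = out.replace(k, v)
--     return out
-- ===== SOURCE B (Python) =====
-- def _map_date_format(fmt: str) -> str:
--     if not fmt:
--         return "%Y-%m-%d"
--     tokens = (("yyyy", "%Y"), ("yy", "%y"), ("dd", "%d"), ("MM", "%m"))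
--     out = []
--     i = 0
--     n = len(fmt)
--     while i < n:
--         for tok, rep in tokens:
--             if fmt.startswith(tok, i):
--                 out.append(rep)
--                 i += len(tok)
--                 break
--         else:
--             out.append(fmt[i])
--             i += 1
--     return "".join(out)
-- ===== Notes on version B (the rewrite author's own statement) =====
-- stated objective: alternative
-- what changed: Replaced the four sequential global str.replace passes with a single left-to-right scan that matches the longest known token (yyyy, yy, dd, MM) at each position and emits its strftime replacement, keeping the empty-string default.
import Mathlib
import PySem

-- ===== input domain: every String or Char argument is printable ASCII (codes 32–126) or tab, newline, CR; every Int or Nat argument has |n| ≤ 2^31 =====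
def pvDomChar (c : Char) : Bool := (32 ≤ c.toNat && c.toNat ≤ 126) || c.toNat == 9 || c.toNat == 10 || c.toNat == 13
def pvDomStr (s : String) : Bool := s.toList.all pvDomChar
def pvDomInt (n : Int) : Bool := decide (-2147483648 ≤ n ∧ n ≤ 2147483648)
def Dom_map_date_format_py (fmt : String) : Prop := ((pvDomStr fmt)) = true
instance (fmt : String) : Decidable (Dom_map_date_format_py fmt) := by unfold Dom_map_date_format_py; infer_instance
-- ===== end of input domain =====

-- B replaces the four sequential global .replace passes by a single left-to-right
-- longest-token-first scan (objective: alternative, same observable result).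

-- ===== PORT A =====
def map_date_format_py (fmt : String) : String :=
  if fmt = "" then "%Y-%m-%d"
  else
    let mapping : PySem.Dict String String :=
      (((PySem.Dict.empty.insert "dd" "%d").insert "MM" "%m").insert "yyyy" "%Y").insert "yy" "%y"
    mapping.items.foldl (fun out kv => PySem.Str.replace out kv.1 kv.2) fmt

-- ===== PORT B =====
-- single pass over the characters, longest token first: yyyy, yy, dd, MM
def altScan : List Char → List Char
  | [] => []
  | c :: t =>
    if ['y','y','y','y'].isPrefixOf (c :: t) then '%' :: 'Y' :: altScan ((c :: t).drop 4)
    else if ['y','y'].isPrefixOf (c :: t) then '%' :: 'y' :: altScan ((c :: t).drop 2)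
    else if ['d','d'].isPrefixOf (c :: t) then '%' :: 'd' :: altScan ((c :: t).drop 2)
    else if ['M','M'].isPrefixOf (c :: t) then '%' :: 'm' :: altScan ((c :: t).drop 2)
    else c :: altScan t
termination_by l => l.length
decreasing_by all_goals simp

def map_date_format_py_alt (fmt : String) : String :=
  if fmt = "" then "%Y-%m-%d" else String.ofList (altScan fmt.toList)

-- ===== PRECONDITION & SPEC =====
def Spec_map_date_format_py (fmt : String) (out : String) : Prop := out = map_date_format_py_alt fmt
instance (fmt : String) (out : String) : Decidable (Spec_map_date_format_py fmt out) := by unfold Spec_map_date_format_py; infer_instance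

-- ===== CLAIM (what is proved, stated in full; the proofs are below) =====
def Claim_equal_map_date_format_py : Prop := ∀ (fmt : String), Dom_map_date_format_py fmt → Spec_map_date_format_py fmt (map_date_format_py fmt)

-- ===== LEMMAS AND PROOFS =====

-- str.replace with a nonempty pattern, as a direct recursion (old = o :: os)
def rep (o : Char) (os new : List Char) : List Char → List Char
  | [] => []
  | c :: t =>
    if (o :: os).isPrefixOf (c :: t) then new ++ rep o os new (t.drop os.length)
    else c :: rep o os new t
termination_by l => l.length
decreasing_by all_goals simp

theorem rep_go (o : Char) (os new : List Char) :
    ∀ (fuel : Nat) (l acc : List Char), l.length ≤ fuel →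
      PySem.Chars.replace.go (o :: os) new fuel l acc = acc.reverse ++ rep o os new l := by
  intro fuel
  induction fuel with
  | zero =>
    intro l acc h
    have hl : l = [] := by cases l <;> simp_all
    subst hl; simp [PySem.Chars.replace.go, rep]
  | succ n ih =>
    intro l acc h
    match l with
    | [] => simp [PySem.Chars.replace.go, rep]
    | c :: t =>
      rw [PySem.Chars.replace.go, rep]
      split
      · next hpre =>
        have hlen : ((c :: t).drop (o :: os).length).length ≤ n := by
          simp at h ⊢; omega
        rw [ih _ _ hlen]
        simp
      · next hpre =>
        rw [ih _ _ (by simp at h ⊢; omega)]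
        simp

theorem replace_eq_rep (o : Char) (os new l : List Char) :
    PySem.Chars.replace l (o :: os) new = rep o os new l := by
  rw [PySem.Chars.replace]
  simp only [List.isEmpty_cons, if_false, Bool.false_eq_true]
  exact rep_go o os new l.length l [] le_rfl

-- the four replace passes of A
def rd (l : List Char) : List Char := rep 'd' ['d'] ['%','d'] l
def rm (l : List Char) : List Char := rep 'M' ['M'] ['%','m'] l
def ry4 (l : List Char) : List Char := rep 'y' ['y','y','y'] ['%','Y'] l
def ry2 (l : List Char) : List Char := rep 'y' ['y'] ['%','y'] l

theorem rep_nil (o : Char) (os new : List Char) : rep o os new [] = [] := by rw [rep]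

theorem not_pref_head {a : Char} {t : List Char} (p : List Char) (h : t.head? ≠ some a) :
    ¬ ((a :: p) <+: t) := by
  intro hp
  cases t with
  | nil => simp at hp
  | cons b u =>
    rw [List.cons_prefix_cons] at hp
    exact h (by rw [List.head?_cons, ← hp.1])

theorem rep_skip {c o : Char} (os new t : List Char) (h : c ≠ o) :
    rep o os new (c :: t) = c :: rep o os new t := by
  have hn : ¬ ((o :: os).isPrefixOf (c :: t) = true) := by
    simpa using not_pref_head os (show (c :: t).head? ≠ some o by simpa using h)
  rw [rep, if_neg hn]

-- match lemmas for the concrete patterns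
theorem rd_dd (u : List Char) : rd ('d' :: 'd' :: u) = '%' :: 'd' :: rd u := by
  rw [rd, rep, if_pos] <;> simp [rd, List.isPrefixOf]

theorem rm_MM (u : List Char) : rm ('M' :: 'M' :: u) = '%' :: 'm' :: rm u := by
  rw [rm, rep, if_pos] <;> simp [rm, List.isPrefixOf]

theorem ry2_yy (u : List Char) : ry2 ('y' :: 'y' :: u) = '%' :: 'y' :: ry2 u := by
  rw [ry2, rep, if_pos] <;> simp [ry2, List.isPrefixOf]

theorem ry4_yyyy (u : List Char) :
    ry4 ('y' :: 'y' :: 'y' :: 'y' :: u) = '%' :: 'Y' :: ry4 u := by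
  rw [ry4, rep, if_pos] <;> simp [ry4, List.isPrefixOf]

-- negative-match (skip) lemmas for mismatching continuations
theorem rd_skip1 {t : List Char} (h : t.head? ≠ some 'd') :
    rd ('d' :: t) = 'd' :: rd t := by
  have hn : ¬ ((['d','d']).isPrefixOf ('d' :: t) = true) := by
    simp only [List.isPrefixOf_iff_prefix]
    exact fun hp => not_pref_head [] h (List.cons_prefix_cons.mp hp).2
  rw [rd, rep, if_neg hn]
  rfl

theorem rm_skip1 {t : List Char} (h : t.head? ≠ some 'M') :
    rm ('M' :: t) = 'M' :: rm t := by
  have hn : ¬ ((['M','M']).isPrefixOf ('M' :: t) = true) := by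
    simp only [List.isPrefixOf_iff_prefix]
    exact fun hp => not_pref_head [] h (List.cons_prefix_cons.mp hp).2
  rw [rm, rep, if_neg hn]
  rfl

theorem ry2_skip1 {t : List Char} (h : t.head? ≠ some 'y') :
    ry2 ('y' :: t) = 'y' :: ry2 t := by
  have hn : ¬ ((['y','y']).isPrefixOf ('y' :: t) = true) := by
    simp only [List.isPrefixOf_iff_prefix]
    exact fun hp => not_pref_head [] h (List.cons_prefix_cons.mp hp).2
  rw [ry2, rep, if_neg hn]
  rfl

theorem ry4_skip1 {t : List Char} (h : ¬ (['y','y','y'] <+: t)) :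
    ry4 ('y' :: t) = 'y' :: ry4 t := by
  have hn : ¬ ((['y','y','y','y']).isPrefixOf ('y' :: t) = true) := by
    simp only [List.isPrefixOf_iff_prefix]
    exact fun hp => h (List.cons_prefix_cons.mp hp).2
  rw [ry4, rep, if_neg hn]
  rfl

-- the head of a rep-output is '%' or the input head
theorem rep_noY {o : Char} {os new : List Char} (hnew : new.head? ≠ some 'y')
    (hne : new ≠ []) : ∀ {u : List Char}, u.head? ≠ some 'y' →
    (rep o os new u).head? ≠ some 'y' := by
  intro u hu
  cases u with
  | nil => simp [rep_nil]
  | cons c t =>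
    rw [rep]
    split
    · cases new with
      | nil => exact absurd rfl hne
      | cons a b => simpa using (by simpa using hnew)
    · simpa using (by simpa using hu)

theorem chain_noY {u : List Char} (hu : u.head? ≠ some 'y') :
    (rm (rd u)).head? ≠ some 'y' :=
  rep_noY (by decide) (by decide) (rep_noY (by decide) (by decide) hu)

theorem ry4_noY {u : List Char} (hu : u.head? ≠ some 'y') :
    (ry4 u).head? ≠ some 'y' :=
  rep_noY (by decide) (by decide) hu

-- yyy is not a prefix of lists with fewer than three leading ys
theorem not_pref_yyy {u : List Char} (hu : u.head? ≠ some 'y') :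
    ¬ (['y','y','y'] <+: u) :=
  not_pref_head _ hu

theorem not_pref_yyy_cons {u : List Char} (hu : u.head? ≠ some 'y') :
    ¬ (['y','y','y'] <+: ('y' :: u)) := by
  intro hp
  exact not_pref_head _ hu (List.cons_prefix_cons.mp hp).2

theorem not_pref_yyy_cons₂ {u : List Char} (hu : u.head? ≠ some 'y') :
    ¬ (['y','y','y'] <+: ('y' :: 'y' :: u)) := by
  intro hp
  have h2 := (List.cons_prefix_cons.mp hp).2
  have h3 := (List.cons_prefix_cons.mp h2).2
  exact not_pref_head [] hu h3

-- altScan unfoldings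
theorem altScan_nil : altScan [] = [] := by rw [altScan]

theorem altScan_yyyy (u : List Char) :
    altScan ('y' :: 'y' :: 'y' :: 'y' :: u) = '%' :: 'Y' :: altScan u := by
  rw [altScan, if_pos] <;> simp [List.isPrefixOf]

theorem altScan_yy {u : List Char} (h : ¬ (['y','y'] <+: u)) :
    altScan ('y' :: 'y' :: u) = '%' :: 'y' :: altScan u := by
  have h1 : ¬ (['y','y','y','y'].isPrefixOf ('y' :: 'y' :: u) = true) := by
    simp only [List.isPrefixOf_iff_prefix]
    intro hp
    exact h (List.cons_prefix_cons.mp (List.cons_prefix_cons.mp hp).2).2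
  rw [altScan, if_neg h1, if_pos]
  · rfl
  · simp [List.isPrefixOf]

theorem altScan_y1 {u : List Char} (h : u.head? ≠ some 'y') :
    altScan ('y' :: u) = 'y' :: altScan u := by
  have h1 : ¬ (['y','y','y','y'].isPrefixOf ('y' :: u) = true) := by
    simp only [List.isPrefixOf_iff_prefix]
    intro hp
    exact not_pref_yyy h (by simpa using (List.cons_prefix_cons.mp hp).2)
  have h2 : ¬ (['y','y'].isPrefixOf ('y' :: u) = true) := by
    simp only [List.isPrefixOf_iff_prefix]
    intro hp
    exact not_pref_head [] h (List.cons_prefix_cons.mp hp).2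
  have h3 : ¬ (['d','d'].isPrefixOf ('y' :: u) = true) := by
    simp only [List.isPrefixOf_iff_prefix]
    exact not_pref_head _ (by simp)
  have h4 : ¬ (['M','M'].isPrefixOf ('y' :: u) = true) := by
    simp only [List.isPrefixOf_iff_prefix]
    exact not_pref_head _ (by simp)
  rw [altScan, if_neg h1, if_neg h2, if_neg h3, if_neg h4]

theorem altScan_dd (u : List Char) :
    altScan ('d' :: 'd' :: u) = '%' :: 'd' :: altScan u := by
  have h1 : ¬ (['y','y','y','y'].isPrefixOf ('d' :: 'd' :: u) = true) := by
    simp only [List.isPrefixOf_iff_prefix]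
    exact not_pref_head _ (by simp)
  have h2 : ¬ (['y','y'].isPrefixOf ('d' :: 'd' :: u) = true) := by
    simp only [List.isPrefixOf_iff_prefix]
    exact not_pref_head _ (by simp)
  rw [altScan, if_neg h1, if_neg h2, if_pos]
  · rfl
  · simp [List.isPrefixOf]

theorem altScan_MM (u : List Char) :
    altScan ('M' :: 'M' :: u) = '%' :: 'm' :: altScan u := by
  have h1 : ¬ (['y','y','y','y'].isPrefixOf ('M' :: 'M' :: u) = true) := by
    simp only [List.isPrefixOf_iff_prefix]
    exact not_pref_head _ (by simp)
  have h2 : ¬ (['y','y'].isPrefixOf ('M' :: 'M' :: u) = true) := by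
    simp only [List.isPrefixOf_iff_prefix]
    exact not_pref_head _ (by simp)
  have h3 : ¬ (['d','d'].isPrefixOf ('M' :: 'M' :: u) = true) := by
    simp only [List.isPrefixOf_iff_prefix]
    exact not_pref_head _ (by simp)
  rw [altScan, if_neg h1, if_neg h2, if_neg h3, if_pos]
  · rfl
  · simp [List.isPrefixOf]

theorem altScan_other {c : Char} {t : List Char}
    (hy : c ≠ 'y') (hd : ¬ (c = 'd' ∧ t.head? = some 'd'))
    (hm : ¬ (c = 'M' ∧ t.head? = some 'M')) :
    altScan (c :: t) = c :: altScan t := by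
  have h1 : ¬ (['y','y','y','y'].isPrefixOf (c :: t) = true) := by
    simp only [List.isPrefixOf_iff_prefix]
    exact not_pref_head _ (by simpa using hy)
  have h2 : ¬ (['y','y'].isPrefixOf (c :: t) = true) := by
    simp only [List.isPrefixOf_iff_prefix]
    exact not_pref_head _ (by simpa using hy)
  have h3 : ¬ (['d','d'].isPrefixOf (c :: t) = true) := by
    simp only [List.isPrefixOf_iff_prefix]
    intro hp
    have := List.cons_prefix_cons.mp hp
    refine hd ⟨this.1.symm, ?_⟩
    cases t with
    | nil => exact absurd this.2 (by simp)
    | cons b v => rw [List.head?_cons, (List.cons_prefix_cons.mp this.2).1]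
  have h4 : ¬ (['M','M'].isPrefixOf (c :: t) = true) := by
    simp only [List.isPrefixOf_iff_prefix]
    intro hp
    have := List.cons_prefix_cons.mp hp
    refine hm ⟨this.1.symm, ?_⟩
    cases t with
    | nil => exact absurd this.2 (by simp)
    | cons b v => rw [List.head?_cons, (List.cons_prefix_cons.mp this.2).1]
  rw [altScan, if_neg h1, if_neg h2, if_neg h3, if_neg h4]

-- concrete short all-y strings, evaluated by the lemmas above
theorem eval_y1 : ry2 (ry4 (rm (rd ['y']))) = ['y'] := by
  rw [rd, rep_skip _ _ _ (by decide), rep_nil]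
  show ry2 (ry4 (rm ['y'])) = _
  rw [rm, rep_skip _ _ _ (by decide), rep_nil]
  show ry2 (ry4 ['y']) = _
  rw [ry4_skip1 (by simp), show ry4 [] = [] from by rw [ry4, rep_nil],
      ry2_skip1 (by simp), show ry2 [] = [] from by rw [ry2, rep_nil]]

theorem eval_y2 : ry2 (ry4 (rm (rd ['y','y']))) = ['%','y'] := by
  rw [rd, rep_skip _ _ _ (by decide), rep_skip _ _ _ (by decide), rep_nil]
  show ry2 (ry4 (rm ['y','y'])) = _
  rw [rm, rep_skip _ _ _ (by decide), rep_skip _ _ _ (by decide), rep_nil]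
  show ry2 (ry4 ['y','y']) = _
  rw [ry4_skip1 (not_pref_yyy_cons (by simp)), ry4_skip1 (not_pref_yyy (by simp)),
      show ry4 [] = [] from by rw [ry4, rep_nil], ry2_yy,
      show ry2 [] = [] from by rw [ry2, rep_nil]]

theorem eval_y3 : ry2 (ry4 (rm (rd ['y','y','y']))) = ['%','y','y'] := by
  rw [rd, rep_skip _ _ _ (by decide), rep_skip _ _ _ (by decide),
      rep_skip _ _ _ (by decide), rep_nil]
  show ry2 (ry4 (rm ['y','y','y'])) = _
  rw [rm, rep_skip _ _ _ (by decide), rep_skip _ _ _ (by decide),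
      rep_skip _ _ _ (by decide), rep_nil]
  show ry2 (ry4 ['y','y','y']) = _
  rw [ry4_skip1 (not_pref_yyy_cons₂ (by simp)), ry4_skip1 (not_pref_yyy_cons (by simp)),
      ry4_skip1 (not_pref_yyy (by simp)), show ry4 [] = [] from by rw [ry4, rep_nil],
      ry2_yy, ry2_skip1 (by simp), show ry2 [] = [] from by rw [ry2, rep_nil]]

theorem eval_scan_y1 : altScan ['y'] = ['y'] := by
  rw [altScan_y1 (by simp), altScan_nil]

theorem eval_scan_y2 : altScan ['y','y'] = ['%','y'] := by
  rw [altScan_yy (by decide), altScan_nil]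

theorem eval_scan_y3 : altScan ['y','y','y'] = ['%','y','y'] := by
  rw [altScan_yy (by decide), altScan_y1 (by simp), altScan_nil]

-- the main equivalence on character lists, by strong induction on length
theorem chain_eq_scan : ∀ (n : Nat) (l : List Char), l.length ≤ n →
    ry2 (ry4 (rm (rd l))) = altScan l := by
  intro n
  induction n with
  | zero =>
    intro l h
    have : l = [] := by cases l <;> simp_all
    subst this
    simp [rd, rm, ry4, ry2, rep_nil, altScan_nil]
  | succ n ih =>
    intro l hl
    match l with
    | [] => simp [rd, rm, ry4, ry2, rep_nil, altScan_nil]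
    | c :: t =>
      simp only [List.length_cons, Nat.succ_le_succ_iff] at hl
      by_cases hy : c = 'y'
      · subst hy
        rcases t with _ | ⟨a, t1⟩
        · -- "y"
          rw [show ([('y' : Char)] : List Char) = ['y'] from rfl, eval_y1, eval_scan_y1]
        · by_cases ha : a = 'y'
          · subst ha
            rcases t1 with _ | ⟨b, t2⟩
            · -- "yy"
              rw [eval_y2, eval_scan_y2]
            · by_cases hb : b = 'y'
              · subst hb
                rcases t2 with _ | ⟨e, t3⟩
                · -- "yyy"
                  rw [eval_y3, eval_scan_y3]
                · by_cases he : e = 'y'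
                  · -- yyyy matched
                    subst he
                    rw [rd, rep_skip _ _ _ (by decide), rep_skip _ _ _ (by decide),
                        rep_skip _ _ _ (by decide), rep_skip _ _ _ (by decide)]
                    show ry2 (ry4 (rm ('y' :: 'y' :: 'y' :: 'y' :: rd t3))) = _
                    rw [rm, rep_skip _ _ _ (by decide), rep_skip _ _ _ (by decide),
                        rep_skip _ _ _ (by decide), rep_skip _ _ _ (by decide)]
                    show ry2 (ry4 ('y' :: 'y' :: 'y' :: 'y' :: rm (rd t3))) = _
                    rw [ry4_yyyy, ry2, rep_skip _ _ _ (by decide), rep_skip _ _ _ (by decide)]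
                    show '%' :: 'Y' :: ry2 (ry4 (rm (rd t3))) = _
                    rw [altScan_yyyy, ih t3 (by simp at hl; omega)]
                  · -- exactly three leading ys
                    have hau : (e :: t3).head? ≠ some 'y' := by simpa using he
                    have hw : (rm (rd (e :: t3))).head? ≠ some 'y' := chain_noY hau
                    rw [rd, rep_skip _ _ _ (by decide), rep_skip _ _ _ (by decide),
                        rep_skip _ _ _ (by decide)]
                    show ry2 (ry4 (rm ('y' :: 'y' :: 'y' :: rd (e :: t3)))) = _
                    rw [rm, rep_skip _ _ _ (by decide), rep_skip _ _ _ (by decide),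
                        rep_skip _ _ _ (by decide)]
                    show ry2 (ry4 ('y' :: 'y' :: 'y' :: rm (rd (e :: t3)))) = _
                    rw [ry4_skip1 (not_pref_yyy_cons₂ hw), ry4_skip1 (not_pref_yyy_cons hw),
                        ry4_skip1 (not_pref_yyy hw)]
                    rw [ry2_yy, ry2_skip1 (ry4_noY hw)]
                    show '%' :: 'y' :: 'y' :: ry2 (ry4 (rm (rd (e :: t3)))) = _
                    have h1 : altScan ('y' :: 'y' :: 'y' :: e :: t3)
                        = '%' :: 'y' :: altScan ('y' :: e :: t3) := by
                      refine altScan_yy ?_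
                      intro hp
                      exact he ((List.cons_prefix_cons.mp (List.cons_prefix_cons.mp hp).2).1).symm
                    rw [h1, altScan_y1 hau, ih (e :: t3) (by simp at hl ⊢; omega)]
              · -- exactly two leading ys
                have hau : (b :: t2).head? ≠ some 'y' := by simpa using hb
                have hw : (rm (rd (b :: t2))).head? ≠ some 'y' := chain_noY hau
                rw [rd, rep_skip _ _ _ (by decide), rep_skip _ _ _ (by decide)]
                show ry2 (ry4 (rm ('y' :: 'y' :: rd (b :: t2)))) = _
                rw [rm, rep_skip _ _ _ (by decide), rep_skip _ _ _ (by decide)]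
                show ry2 (ry4 ('y' :: 'y' :: rm (rd (b :: t2)))) = _
                rw [ry4_skip1 (not_pref_yyy_cons hw), ry4_skip1 (not_pref_yyy hw), ry2_yy]
                show '%' :: 'y' :: ry2 (ry4 (rm (rd (b :: t2)))) = _
                rw [altScan_yy (not_pref_head _ hau), ih (b :: t2) (by simp at hl ⊢; omega)]
          · -- single y
            have hau : (a :: t1).head? ≠ some 'y' := by simpa using ha
            have hw : (rm (rd (a :: t1))).head? ≠ some 'y' := chain_noY hau
            rw [rd, rep_skip _ _ _ (by decide)]
            show ry2 (ry4 (rm ('y' :: rd (a :: t1)))) = _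
            rw [rm, rep_skip _ _ _ (by decide)]
            show ry2 (ry4 ('y' :: rm (rd (a :: t1)))) = _
            rw [ry4_skip1 (not_pref_yyy hw), ry2_skip1 (ry4_noY hw)]
            show 'y' :: ry2 (ry4 (rm (rd (a :: t1)))) = _
            rw [altScan_y1 hau, ih (a :: t1) (by simpa using hl)]
      · by_cases hd : c = 'd' ∧ t.head? = some 'd'
        · obtain ⟨hc, ht⟩ := hd
          subst hc
          obtain ⟨u, rfl⟩ : ∃ u, t = 'd' :: u := by
            cases t with
            | nil => simp at ht
            | cons x xs => simp at ht; exact ⟨xs, by simp [ht]⟩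
          rw [rd_dd]
          rw [rm, rep_skip _ _ _ (by decide), rep_skip _ _ _ (by decide)]
          show ry2 (ry4 ('%' :: 'd' :: rm (rd u))) = _
          rw [ry4, rep_skip _ _ _ (by decide), rep_skip _ _ _ (by decide)]
          show ry2 ('%' :: 'd' :: ry4 (rm (rd u))) = _
          rw [ry2, rep_skip _ _ _ (by decide), rep_skip _ _ _ (by decide)]
          show '%' :: 'd' :: ry2 (ry4 (rm (rd u))) = _
          rw [altScan_dd, ih u (by simp at hl; omega)]
        · by_cases hm : c = 'M' ∧ t.head? = some 'M'
          · obtain ⟨hc, ht⟩ := hm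
            subst hc
            obtain ⟨u, rfl⟩ : ∃ u, t = 'M' :: u := by
              cases t with
              | nil => simp at ht
              | cons x xs => simp at ht; exact ⟨xs, by simp [ht]⟩
            rw [rd, rep_skip _ _ _ (by decide), rep_skip _ _ _ (by decide)]
            show ry2 (ry4 (rm ('M' :: 'M' :: rd u))) = _
            rw [rm_MM]
            rw [ry4, rep_skip _ _ _ (by decide), rep_skip _ _ _ (by decide)]
            show ry2 ('%' :: 'm' :: ry4 (rm (rd u))) = _
            rw [ry2, rep_skip _ _ _ (by decide), rep_skip _ _ _ (by decide)]
            show '%' :: 'm' :: ry2 (ry4 (rm (rd u))) = _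
            rw [altScan_MM, ih u (by simp at hl; omega)]
          · -- no token at this position
            have hrd : rd (c :: t) = c :: rd t := by
              by_cases hcd : c = 'd'
              · subst hcd
                exact rd_skip1 (fun h => hd ⟨rfl, h⟩)
              · exact rep_skip _ _ _ hcd
            have hrm : rm (c :: rd t) = c :: rm (rd t) := by
              by_cases hcm : c = 'M'
              · subst hcm
                refine rm_skip1 ?_
                intro h
                cases t with
                | nil => simp [rd, rep_nil] at h
                | cons a u =>
                  rw [rd] at h
                  by_cases hp : (['d','d'] : List Char).isPrefixOf (a :: u) = true
                  · rw [rep, if_pos hp] at h; simp at h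
                  · rw [rep, if_neg hp] at h
                    simp at h
                    exact hm ⟨rfl, by simp [h]⟩
              · exact rep_skip _ _ _ hcm
            have hry4 : ry4 (c :: rm (rd t)) = c :: ry4 (rm (rd t)) := rep_skip _ _ _ hy
            have hry2 : ry2 (c :: ry4 (rm (rd t))) = c :: ry2 (ry4 (rm (rd t))) :=
              rep_skip _ _ _ hy
            rw [hrd]
            show ry2 (ry4 (rm (c :: rd t))) = _
            rw [hrm, hry4, hry2, altScan_other hy hd hm, ih t hl]

-- evaluate A's foldl over the literal mapping
theorem portA_eq (fmt : String) (h : ¬ fmt = "") :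
    map_date_format_py fmt =
      PySem.Str.replace (PySem.Str.replace (PySem.Str.replace
        (PySem.Str.replace fmt "dd" "%d") "MM" "%m") "yyyy" "%Y") "yy" "%y" := by
  rw [map_date_format_py, if_neg h]
  rfl

-- ===== VERDICT (by name: the statement is the Claim_ definition above) =====
theorem map_date_format_py_spec : Claim_equal_map_date_format_py := by
  intro fmt _
  unfold Spec_map_date_format_py map_date_format_py_alt
  by_cases h : fmt = ""
  · simp [map_date_format_py, h]
  · rw [if_neg h, portA_eq fmt h]
    rw [PySem.Str.replace, PySem.Str.replace, PySem.Str.replace, PySem.Str.replace]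
    simp only [String.toList_ofList]
    rw [show ("dd" : String).toList = ['d','d'] from rfl,
        show ("%d" : String).toList = ['%','d'] from rfl,
        show ("MM" : String).toList = ['M','M'] from rfl,
        show ("%m" : String).toList = ['%','m'] from rfl,
        show ("yyyy" : String).toList = ['y','y','y','y'] from rfl,
        show ("%Y" : String).toList = ['%','Y'] from rfl,
        show ("yy" : String).toList = ['y','y'] from rfl,
        show ("%y" : String).toList = ['%','y'] from rfl]
    rw [replace_eq_rep, replace_eq_rep, replace_eq_rep, replace_eq_rep]
    have := chain_eq_scan fmt.toList.length fmt.toList le_rfl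
    simp only [rd, rm, ry4, ry2] at this
    rw [this]
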